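-- pv_equiv track=rewrite | github.com/chahat1709/Friday-Omega | python_backend/automation/iot_agent.py | _generate_security_report
-- ===== SOURCE A (Python) =====
-- def _generate_security_report(ip, open_ports):
--     """
--     Generates a Hardening Report based on open ports.
--     Explains theoretical risks and remediation steps (Defensive Audit).
--     """
--     report = ["=== SECURITY AUDIT & REMEDIATION REPORT ==="]
--     report.append(f"Target: {ip}")
--
--     for port_desc in open_ports:
--         # Extract port number (fix string matching bug)
--         port_num = int(port_desc.split()[0])
--
--         if port_num == 23:  # TELNET (exact match)
--             report.append(f"\n[CRITICAL] Port 23 (Telnet) is OPEN.")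
--             report.append("  - RISK: Insecure protocol. Passwords sent in cleartext.")
--             report.append("  - ATTACK VECTOR: Credential Sniffing / Man-in-the-Middle.")
--             report.append("  - REMEDIATION: Disable Telnet immediately. Use SSH (Port 22) instead.")
--
--         elif port_num == 21:  # FTP
--             report.append(f"\n[HIGH] Port 21 (FTP) is OPEN.")
--             report.append("  - RISK: Unencrypted file transfer.")
--             report.append("  - REMEDIATION: Switch to SFTP or FTPS.")
--
--         elif port_num == 80:  # HTTP
--             report.append(f"\n[MEDIUM] Port 80 (HTTP) is OPEN.")
--             report.append("  - RISK: Unencrypted web traffic.")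
--             report.append("  - REMEDIATION: Ensure Administration Panels use HTTPS (Port 443).")
--
--         elif port_num == 3389:  # RDP
--             report.append(f"\n[MEDIUM] Port 3389 (RDP) is OPEN.")
--             report.append("  - RISK: Remote Desktop exposed to LAN.")
--             report.append("  - REMEDIATION: Ensure NLA (Network Level Authentication) is enabled and use strong passwords.")
--
--         elif port_num == 3306:  # MySQL
--             report.append(f"\n[HIGH] Port 3306 (MySQL) is OPEN.")
--             report.append("  - RISK: Database exposed to network.")
--             report.append("  - REMEDIATION: Bind to localhost only, use strong passwords.")
--
--         elif port_num == 5900:  # VNC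
--             report.append(f"\n[CRITICAL] Port 5900 (VNC) is OPEN.")
--             report.append("  - RISK: Remote desktop control, often weak passwords.")
--             report.append("  - REMEDIATION: Use SSH tunneling, strong authentication.")
--
--     report.append("\n[SUMMARY] To secure this device, close unused ports and update firmware.")
--     return "\n".join(report)
-- ===== SOURCE B (Python) =====
-- # B: declarative table of (port, severity, service, bullets) records plus a generic
-- # section renderer; staged passes (parse all port numbers, render matching sections
-- # by scanning the table, join) instead of A's single pass with a hardcoded if/elif
-- # text chain appending literal lines.
--
-- _SECTIONS = [
--     (23, "CRITICAL", "Telnet",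
--      ["RISK: Insecure protocol. Passwords sent in cleartext.",
--       "ATTACK VECTOR: Credential Sniffing / Man-in-the-Middle.",
--       "REMEDIATION: Disable Telnet immediately. Use SSH (Port 22) instead."]),
--     (21, "HIGH", "FTP",
--      ["RISK: Unencrypted file transfer.",
--       "REMEDIATION: Switch to SFTP or FTPS."]),
--     (80, "MEDIUM", "HTTP",
--      ["RISK: Unencrypted web traffic.",
--       "REMEDIATION: Ensure Administration Panels use HTTPS (Port 443)."]),
--     (3389, "MEDIUM", "RDP",
--      ["RISK: Remote Desktop exposed to LAN.",
--       "REMEDIATION: Ensure NLA (Network Level Authentication) is enabled and use strong passwords."]),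
--     (3306, "HIGH", "MySQL",
--      ["RISK: Database exposed to network.",
--       "REMEDIATION: Bind to localhost only, use strong passwords."]),
--     (5900, "CRITICAL", "VNC",
--      ["RISK: Remote desktop control, often weak passwords.",
--       "REMEDIATION: Use SSH tunneling, strong authentication."]),
-- ]
--
--
-- def _render(num, sev, svc, bullets):
--     return "\n".join(["\n[%s] Port %d (%s) is OPEN." % (sev, num, svc)]
--                      + ["  - " + b for b in bullets])
--
--
-- def _generate_security_report(ip, open_ports):
--     nums = [int(pd.split()[0]) for pd in open_ports]
--     sections = [_render(*e) for n in nums for e in _SECTIONS if e[0] == n]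
--     return "\n".join(["=== SECURITY AUDIT & REMEDIATION REPORT ===", "Target: " + ip]
--                      + sections
--                      + ["\n[SUMMARY] To secure this device, close unused ports and update firmware."])
-- ===== Notes on version B (the rewrite author's own statement) =====
-- stated objective: alternative
-- what changed: Replaces A's single pass with a hardcoded six-branch if/elif chain appending literal report lines by a declarative records table (port, severity, service, bullets) plus a generic section renderer that synthesizes each line, run in staged passes: parse all port numbers, render the sections matching each number by scanning the table, then join.
import Mathlib
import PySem

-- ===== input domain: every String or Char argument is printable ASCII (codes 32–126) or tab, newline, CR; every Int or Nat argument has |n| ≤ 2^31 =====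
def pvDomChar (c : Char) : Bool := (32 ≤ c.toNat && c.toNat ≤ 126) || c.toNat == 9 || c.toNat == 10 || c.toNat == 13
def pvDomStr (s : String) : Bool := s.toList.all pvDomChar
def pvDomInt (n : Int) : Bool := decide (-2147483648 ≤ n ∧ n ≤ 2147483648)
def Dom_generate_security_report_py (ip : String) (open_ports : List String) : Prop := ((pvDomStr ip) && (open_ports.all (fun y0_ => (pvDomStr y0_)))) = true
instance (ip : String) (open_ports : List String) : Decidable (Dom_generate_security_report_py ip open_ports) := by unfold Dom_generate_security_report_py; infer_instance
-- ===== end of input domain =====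

-- B renders each port's section from a declarative (port, severity, service, bullets)
-- table with a generic renderer, in staged passes (parse, render, join), instead of
-- A's single pass appending hardcoded if/elif text lines (objective: alternative).


-- ===== PORT A =====
def generate_security_report_py (ip : String) (open_ports : List String) : String :=
  let report : List String := ["=== SECURITY AUDIT & REMEDIATION REPORT ==="]
  let report := report ++ ["Target: " ++ ip]
  let report := open_ports.foldl (fun report port_desc =>
    -- port_num = int(port_desc.split()[0]); [0] (IndexError) and int() (ValueError)
    -- can raise; those inputs are excluded by Pre_ and the port just keeps `report`.
    match (PySem.Str.split₀ port_desc).head? with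
    | none => report
    | some tok =>
      match PySem.Int.ofStr? tok with
      | none => report
      | some port_num =>
        if port_num = 23 then
          report ++ ["\n[CRITICAL] Port 23 (Telnet) is OPEN.",
                     "  - RISK: Insecure protocol. Passwords sent in cleartext.",
                     "  - ATTACK VECTOR: Credential Sniffing / Man-in-the-Middle.",
                     "  - REMEDIATION: Disable Telnet immediately. Use SSH (Port 22) instead."]
        else if port_num = 21 then
          report ++ ["\n[HIGH] Port 21 (FTP) is OPEN.",
                     "  - RISK: Unencrypted file transfer.",
                     "  - REMEDIATION: Switch to SFTP or FTPS."]
        else if port_num = 80 then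
          report ++ ["\n[MEDIUM] Port 80 (HTTP) is OPEN.",
                     "  - RISK: Unencrypted web traffic.",
                     "  - REMEDIATION: Ensure Administration Panels use HTTPS (Port 443)."]
        else if port_num = 3389 then
          report ++ ["\n[MEDIUM] Port 3389 (RDP) is OPEN.",
                     "  - RISK: Remote Desktop exposed to LAN.",
                     "  - REMEDIATION: Ensure NLA (Network Level Authentication) is enabled and use strong passwords."]
        else if port_num = 3306 then
          report ++ ["\n[HIGH] Port 3306 (MySQL) is OPEN.",
                     "  - RISK: Database exposed to network.",
                     "  - REMEDIATION: Bind to localhost only, use strong passwords."]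
        else if port_num = 5900 then
          report ++ ["\n[CRITICAL] Port 5900 (VNC) is OPEN.",
                     "  - RISK: Remote desktop control, often weak passwords.",
                     "  - REMEDIATION: Use SSH tunneling, strong authentication."]
        else report) report
  PySem.Str.join "\n" (report ++ ["\n[SUMMARY] To secure this device, close unused ports and update firmware."])

-- ===== PORT B =====
-- _SECTIONS: (port, severity, service, bullets)
def pvSections : List (Int × String × String × List String) :=
  [(23, "CRITICAL", "Telnet",
     ["RISK: Insecure protocol. Passwords sent in cleartext.",
      "ATTACK VECTOR: Credential Sniffing / Man-in-the-Middle.",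
      "REMEDIATION: Disable Telnet immediately. Use SSH (Port 22) instead."]),
   (21, "HIGH", "FTP",
     ["RISK: Unencrypted file transfer.",
      "REMEDIATION: Switch to SFTP or FTPS."]),
   (80, "MEDIUM", "HTTP",
     ["RISK: Unencrypted web traffic.",
      "REMEDIATION: Ensure Administration Panels use HTTPS (Port 443)."]),
   (3389, "MEDIUM", "RDP",
     ["RISK: Remote Desktop exposed to LAN.",
      "REMEDIATION: Ensure NLA (Network Level Authentication) is enabled and use strong passwords."]),
   (3306, "HIGH", "MySQL",
     ["RISK: Database exposed to network.",
      "REMEDIATION: Bind to localhost only, use strong passwords."]),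
   (5900, "CRITICAL", "VNC",
     ["RISK: Remote desktop control, often weak passwords.",
      "REMEDIATION: Use SSH tunneling, strong authentication."])]

-- _render(num, sev, svc, bullets)
def pvRender (e : Int × String × String × List String) : String :=
  PySem.Str.join "\n"
    (("\n[" ++ e.2.1 ++ "] Port " ++ PySem.Int.toStr e.1 ++ " (" ++ e.2.2.1 ++ ") is OPEN.")
      :: e.2.2.2.map (fun b => "  - " ++ b))

def generate_security_report_py_alt (ip : String) (open_ports : List String) : String :=
  -- nums = [int(pd.split()[0]) for pd in open_ports]; [0]/int() raise on inputs
  -- outside Pre_, where the port just uses 0 (which matches no section).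
  let nums := open_ports.map (fun pd => (PySem.Int.ofStr? ((PySem.Str.split₀ pd).headD "")).getD 0)
  let sections := nums.flatMap (fun n => (pvSections.filter (fun e => e.1 == n)).map pvRender)
  PySem.Str.join "\n"
    (["=== SECURITY AUDIT & REMEDIATION REPORT ===", "Target: " ++ ip]
      ++ sections
      ++ ["\n[SUMMARY] To secure this device, close unused ports and update firmware."])

-- ===== PRECONDITION & SPEC =====
-- Pre_ excludes exactly the inputs on which A raises: a port description whose first
-- whitespace token is missing (IndexError) or is not an int literal (ValueError).
def Pre_generate_security_report_py (ip : String) (open_ports : List String) : Prop :=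
  ∀ pd ∈ open_ports, PySem.Str.split₀ pd ≠ [] ∧
    (PySem.Int.ofStr? ((PySem.Str.split₀ pd).headD "")).isSome = true
instance (ip : String) (open_ports : List String) : Decidable (Pre_generate_security_report_py ip open_ports) := by unfold Pre_generate_security_report_py; infer_instance

def pvWitness_generate_security_report_py : String × List String :=
  ("192.168.0.1", ["23 (telnet)", "80 (http)", "22 (ssh)"])

def Spec_generate_security_report_py (ip : String) (open_ports : List String) (out : String) : Prop := out = generate_security_report_py_alt ip open_ports
instance (ip : String) (open_ports : List String) (out : String) : Decidable (Spec_generate_security_report_py ip open_ports out) := by unfold Spec_generate_security_report_py; infer_instance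

-- ===== CLAIM (what is proved, stated in full; the proofs are below) =====
def Claim_equal_generate_security_report_py : Prop := ∀ (ip : String) (open_ports : List String), Dom_generate_security_report_py ip open_ports → Pre_generate_security_report_py ip open_ports → Spec_generate_security_report_py ip open_ports (generate_security_report_py ip open_ports)

-- ===== LEMMAS AND PROOFS =====
-- helper (proof-only): what A's loop body appends for one port description
def pvLinesA (pd : String) : List String :=
  match (PySem.Str.split₀ pd).head? with
  | none => []
  | some tok =>
    match PySem.Int.ofStr? tok with
    | none => []
    | some n =>
      if n = 23 then
        ["\n[CRITICAL] Port 23 (Telnet) is OPEN.",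
         "  - RISK: Insecure protocol. Passwords sent in cleartext.",
         "  - ATTACK VECTOR: Credential Sniffing / Man-in-the-Middle.",
         "  - REMEDIATION: Disable Telnet immediately. Use SSH (Port 22) instead."]
      else if n = 21 then
        ["\n[HIGH] Port 21 (FTP) is OPEN.",
         "  - RISK: Unencrypted file transfer.",
         "  - REMEDIATION: Switch to SFTP or FTPS."]
      else if n = 80 then
        ["\n[MEDIUM] Port 80 (HTTP) is OPEN.",
         "  - RISK: Unencrypted web traffic.",
         "  - REMEDIATION: Ensure Administration Panels use HTTPS (Port 443)."]
      else if n = 3389 then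
        ["\n[MEDIUM] Port 3389 (RDP) is OPEN.",
         "  - RISK: Remote Desktop exposed to LAN.",
         "  - REMEDIATION: Ensure NLA (Network Level Authentication) is enabled and use strong passwords."]
      else if n = 3306 then
        ["\n[HIGH] Port 3306 (MySQL) is OPEN.",
         "  - RISK: Database exposed to network.",
         "  - REMEDIATION: Bind to localhost only, use strong passwords."]
      else if n = 5900 then
        ["\n[CRITICAL] Port 5900 (VNC) is OPEN.",
         "  - RISK: Remote desktop control, often weak passwords.",
         "  - REMEDIATION: Use SSH tunneling, strong authentication."]
      else []

lemma pvStepA (rep : List String) (pd : String) :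
    (fun report port_desc =>
      match (PySem.Str.split₀ port_desc).head? with
      | none => report
      | some tok =>
        match PySem.Int.ofStr? tok with
        | none => report
        | some port_num =>
          if port_num = 23 then
            report ++ ["\n[CRITICAL] Port 23 (Telnet) is OPEN.",
                       "  - RISK: Insecure protocol. Passwords sent in cleartext.",
                       "  - ATTACK VECTOR: Credential Sniffing / Man-in-the-Middle.",
                       "  - REMEDIATION: Disable Telnet immediately. Use SSH (Port 22) instead."]
          else if port_num = 21 then
            report ++ ["\n[HIGH] Port 21 (FTP) is OPEN.",
                       "  - RISK: Unencrypted file transfer.",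
                       "  - REMEDIATION: Switch to SFTP or FTPS."]
          else if port_num = 80 then
            report ++ ["\n[MEDIUM] Port 80 (HTTP) is OPEN.",
                       "  - RISK: Unencrypted web traffic.",
                       "  - REMEDIATION: Ensure Administration Panels use HTTPS (Port 443)."]
          else if port_num = 3389 then
            report ++ ["\n[MEDIUM] Port 3389 (RDP) is OPEN.",
                       "  - RISK: Remote Desktop exposed to LAN.",
                       "  - REMEDIATION: Ensure NLA (Network Level Authentication) is enabled and use strong passwords."]
          else if port_num = 3306 then
            report ++ ["\n[HIGH] Port 3306 (MySQL) is OPEN.",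
                       "  - RISK: Database exposed to network.",
                       "  - REMEDIATION: Bind to localhost only, use strong passwords."]
          else if port_num = 5900 then
            report ++ ["\n[CRITICAL] Port 5900 (VNC) is OPEN.",
                       "  - RISK: Remote desktop control, often weak passwords.",
                       "  - REMEDIATION: Use SSH tunneling, strong authentication."]
          else report) rep pd = rep ++ pvLinesA pd := by
  rcases h : (PySem.Str.split₀ pd).head? with _ | tok
  · simp [pvLinesA, h]
  · rcases h2 : PySem.Int.ofStr? tok with _ | n
    · simp [pvLinesA, h, h2]
    · simp only [pvLinesA, h, h2]
      split_ifs <;> simp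

-- per-port bridge: '\n'-prefixing each of A's lines gives exactly the '\n'-prefixed
-- rendered sections B produces for that port description
lemma pvFilterNone (n : Int) (h1 : ¬n = 23) (h2 : ¬n = 21) (h3 : ¬n = 80)
    (h4 : ¬n = 3389) (h5 : ¬n = 3306) (h6 : ¬n = 5900) :
    pvSections.filter (fun e => e.1 == n) = [] := by
  simp [pvSections, beq_iff_eq,
        Ne.symm h1, Ne.symm h2, Ne.symm h3, Ne.symm h4, Ne.symm h5, Ne.symm h6]

-- per-port bridge: '\n'-prefixing each of A's lines gives exactly the '\n'-prefixed
-- rendered sections B produces for that port description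
set_option maxRecDepth 20000 in
set_option maxHeartbeats 1000000 in
lemma pvElem (pd : String) :
    (pvLinesA pd).flatMap (fun s => '\n' :: s.toList)
      = (((pvSections.filter (fun e =>
            e.1 == (PySem.Int.ofStr? ((PySem.Str.split₀ pd).headD "")).getD 0)).map
          pvRender).flatMap (fun s => '\n' :: s.toList)) := by
  rcases h : (PySem.Str.split₀ pd).head? with _ | tok
  · have hd : (PySem.Str.split₀ pd).headD "" = "" := by
      simp [List.headD_eq_head?_getD, h]
    rw [hd, (by decide : PySem.Int.ofStr? "" = none)]
    simp only [Option.getD_none]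
    rw [pvFilterNone 0 (by decide) (by decide) (by decide) (by decide) (by decide) (by decide)]
    simp [pvLinesA, h]
  · have hd : (PySem.Str.split₀ pd).headD "" = tok := by
      simp [List.headD_eq_head?_getD, h]
    rw [hd]
    rcases h2 : PySem.Int.ofStr? tok with _ | n
    · simp only [Option.getD_none]
      rw [pvFilterNone 0 (by decide) (by decide) (by decide) (by decide) (by decide) (by decide)]
      simp [pvLinesA, h, h2]
    · simp only [pvLinesA, h, h2, Option.getD_some]
      split_ifs with h1 h2 h3 h4 h5 h6
      · subst h1; decide
      · subst h2; decide
      · subst h3; decide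
      · subst h4; decide
      · subst h5; decide
      · subst h6; decide
      · rw [pvFilterNone n h1 h2 h3 h4 h5 h6]; simp

lemma pvJoinCons (xs : List (List Char)) (a : List Char) :
    PySem.Chars.join ['\n'] (a :: xs) = a ++ xs.flatMap (fun x => '\n' :: x) := by
  induction xs generalizing a with
  | nil => simp [PySem.Chars.join_singleton]
  | cons b xs ih => rw [PySem.Chars.join_cons_cons, ih b]; simp

-- ===== VERDICT (by name: the statement is the Claim_ definition above) =====
theorem generate_security_report_py_spec : Claim_equal_generate_security_report_py := by
  intro ip ps _ _
  unfold Spec_generate_security_report_py generate_security_report_py generate_security_report_py_alt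
  simp only []
  apply String.toList_inj.mp
  rw [PySem.List.foldl_congr_mem _ _ _ _ (fun acc x h => pvStepA acc x)]
  rw [PySem.List.foldl_append_eq_flatMap]
  rw [PySem.Str.toList_join, PySem.Str.toList_join]
  have hsep : String.toList "\n" = ['\n'] := by decide
  simp only [hsep]
  simp only [List.map_append, List.map_cons, List.map_nil, List.cons_append, List.nil_append]
  rw [pvJoinCons, pvJoinCons]
  simp only [List.flatMap_append, List.flatMap_cons, List.flatMap_nil, List.append_nil]
  congr 1
  congr 1
  congr 1
  rw [List.flatMap_map, List.flatMap_map, List.flatMap_assoc, List.flatMap_assoc,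
      List.flatMap_map]
  refine List.flatMap_congr (fun pd _ => ?_)
  exact pvElem pd
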